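-- pv_equiv track=rewrite | github.com/akalin/advent-of-code-2019-python3 | day08.py | compute_day08
-- ===== SOURCE A (Python) =====
-- def count_digits(layer, d):
--     return sum([1 for x in layer if x == d])
--
-- def get_pixel(layers, i):
--     for layer in layers:
--         if layer[i] != '2':
--             return layer[i]
--     raise Exception('what')
--
-- def compute_day08(input, m, n):
--     layers = [input[i*m*n:(i+1)*m*n] for i in range(len(input)//(m*n))]
--     min_i = -1
--     min_count = m*n
--     for i, l in enumerate(layers):
--         c = count_digits(l, '0')
--         if c < min_count:
--             min_i = i
--             min_count = c
--     p1 = count_digits(layers[min_i], '1') * count_digits(layers[min_i], '2')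
--
--     image = [get_pixel(layers, i) for i in range(m*n)]
--     rows = [''.join(image[i*n:(i+1)*n]) for i in range(len(image)//m)]
--     return rows
-- ===== SOURCE B (Python) =====
-- def compute_day08(input, m, n):
--     size = m * n
--     layers = [input[i*size:(i+1)*size] for i in range(len(input)//size)]
--     best = min(layers, key=lambda l: l.count('0'))
--     p1 = best.count('1') * best.count('2')  # part-1 checksum: computed and discarded, as in A
--     image = ['2'] * size
--     for layer in reversed(layers):
--         for i, c in enumerate(layer):
--             if c != '2':
--                 image[i] = c
--     if '2' in image:
--         raise Exception('what')
--     return [''.join(image[i*n:(i+1)*n]) for i in range(len(image)//m)]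
-- ===== Notes on version B (the rewrite author's own statement) =====
-- stated objective: alternative
-- what changed: Replaces the per-pixel get_pixel scan over all layers with a single bottom-up overlay (start from an all-transparent buffer, walk the layers in reverse and paint each opaque pixel, then check no transparent pixel is left), and computes the discarded part-1 checksum with min(key=)/str.count instead of A's hand-rolled enumerate/count loop.
import Mathlib
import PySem

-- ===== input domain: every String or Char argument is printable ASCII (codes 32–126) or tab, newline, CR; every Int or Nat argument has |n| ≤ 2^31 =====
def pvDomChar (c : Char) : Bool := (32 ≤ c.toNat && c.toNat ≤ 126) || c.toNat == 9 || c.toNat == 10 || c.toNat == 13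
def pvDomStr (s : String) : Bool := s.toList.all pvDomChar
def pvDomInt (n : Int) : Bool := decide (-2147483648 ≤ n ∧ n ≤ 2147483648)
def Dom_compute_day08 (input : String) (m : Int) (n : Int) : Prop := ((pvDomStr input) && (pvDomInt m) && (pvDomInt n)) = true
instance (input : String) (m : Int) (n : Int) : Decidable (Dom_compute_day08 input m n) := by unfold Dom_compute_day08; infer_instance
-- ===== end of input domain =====

-- B overlays the layers bottom-up onto one image buffer (then checks no transparent pixel is left)
-- instead of scanning all layers per pixel, and computes the discarded part-1 checksum with
-- min(key=)/str.count instead of A's hand-rolled scan (objective: alternative).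

-- ===== PORT A =====
-- sum([1 for x in layer if x == d])
def count_digits (layer : List Char) (d : Char) : Int :=
  (((layer.filter (fun x => x == d)).map (fun _ => (1 : Int)))).sum

-- for layer in layers: if layer[i] != '2': return layer[i]; raise  (none = the raise / IndexError)
def get_pixel (layers : List (List Char)) (i : Int) : Option Char :=
  match layers with
  | [] => none
  | l :: rest =>
    match PySem.List.pyGet? l i with
    | none => none
    | some c => if c ≠ '2' then some c else get_pixel rest i

def compute_day08 (input : String) (m : Int) (n : Int) : List String :=
  let layers : List (List Char) :=
    (PySem.List.pyRange 0 (PySem.Int.floordiv (PySem.Str.len input) (m*n)) 1).map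
      (fun i => PySem.List.slice input.toList (some (i*(m*n))) (some ((i+1)*(m*n))))
  let scan :=
    (PySem.List.enumerate layers 0).foldl
      (fun (s : Int × Int) il =>
        let c := count_digits il.2 '0'
        if c < s.2 then (il.1, c) else s)
      (-1, m*n)
  let min_i := scan.1
  -- p1 is computed by A but never used in the returned value ('.getD []' only fills the
  -- IndexError case layers = [], which Pre_ excludes)
  let _p1 := count_digits ((PySem.List.pyGet? layers min_i).getD []) '1' *
             count_digits ((PySem.List.pyGet? layers min_i).getD []) '2'
  -- '.getD '2'' only fills the all-transparent Exception case, which Pre_ excludes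
  let image : List Char :=
    (PySem.List.pyRange 0 (m*n) 1).map (fun i => (get_pixel layers i).getD '2')
  (PySem.List.pyRange 0 (PySem.Int.floordiv (image.length : Int) m) 1).map
    (fun i => String.ofList (PySem.List.slice image (some (i*n)) (some ((i+1)*n))))

-- ===== PORT B =====
-- inner loop body: for i, c in enumerate(layer): if c != '2': image[i] = c
-- (the enumerate index is ≥ 0, so '.toNat' is exact here)
def pvOverlayStep (img : List Char) (ic : Int × Char) : List Char :=
  if ic.2 ≠ '2' then img.set ic.1.toNat ic.2 else img

def pvOverlayLayer (img layer : List Char) : List Char :=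
  (PySem.List.enumerate layer 0).foldl pvOverlayStep img

def compute_day08_alt (input : String) (m : Int) (n : Int) : List String :=
  let size := m * n
  let layers : List (List Char) :=
    (PySem.List.pyRange 0 (PySem.Int.floordiv (PySem.Str.len input) size) 1).map
      (fun i => PySem.List.slice input.toList (some (i*size)) (some ((i+1)*size)))
  -- p1: computed and discarded, as in A ('none' = min's ValueError on empty layers, excluded by Pre_)
  let _p1 : Int :=
    match PySem.List.min? layers (fun l => l.count '0') with
    | none => 0
    | some best => (best.count '1' : Int) * (best.count '2' : Int)
  let image : List Char := layers.reverse.foldl pvOverlayLayer (PySem.List.pyRepeat ['2'] size)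
  if image.contains '2' then []  -- raise Exception('what'): excluded by Pre_
  else
    (PySem.List.pyRange 0 (PySem.Int.floordiv (image.length : Int) m) 1).map
      (fun i => String.ofList (PySem.List.slice image (some (i*n)) (some ((i+1)*n))))

-- ===== PRECONDITION & SPEC =====
-- Pre_ excludes exactly the inputs where A raises: m*n ≤ 0 (ZeroDivisionError or an empty
-- layer list), len(input) < m*n (layers[-1] IndexError), and any pixel position transparent
-- ('2') in every layer (Exception('what')).
def Pre_compute_day08 (input : String) (m : Int) (n : Int) : Prop :=
  0 < m * n ∧ m * n ≤ (input.toList.length : Int) ∧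
  ∀ i < (m*n).toNat, ∃ j < input.toList.length / (m*n).toNat,
    input.toList.getD (j * (m*n).toNat + i) '2' ≠ '2'
instance (input : String) (m : Int) (n : Int) : Decidable (Pre_compute_day08 input m n) := by
  unfold Pre_compute_day08; infer_instance

def pvWitness_compute_day08 : String × Int × Int := ("010101", 2, 3)

def Spec_compute_day08 (input : String) (m : Int) (n : Int) (out : List String) : Prop := out = compute_day08_alt input m n
instance (input : String) (m : Int) (n : Int) (out : List String) : Decidable (Spec_compute_day08 input m n out) := by unfold Spec_compute_day08; infer_instance

-- ===== CLAIM (what is proved, stated in full; the proofs are below) =====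
def Claim_equal_compute_day08 : Prop := ∀ (input : String) (m : Int) (n : Int), Dom_compute_day08 input m n → Pre_compute_day08 input m n → Spec_compute_day08 input m n (compute_day08 input m n)

-- ===== LEMMAS AND PROOFS =====

theorem pvWitness_ok :
    Dom_compute_day08 pvWitness_compute_day08.1 pvWitness_compute_day08.2.1 pvWitness_compute_day08.2.2 ∧
    Pre_compute_day08 pvWitness_compute_day08.1 pvWitness_compute_day08.2.1 pvWitness_compute_day08.2.2 := by
  decide

-- any fold of pvOverlayStep preserves the buffer length
theorem length_foldl_pvOverlayStep (ps : List (Int × Char)) (img : List Char) :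
    (ps.foldl pvOverlayStep img).length = img.length := by
  induction ps generalizing img with
  | nil => rfl
  | cons p ps ih =>
    simp only [List.foldl_cons, ih]
    unfold pvOverlayStep
    split <;> simp

theorem length_pvOverlayLayer (img layer : List Char) :
    (pvOverlayLayer img layer).length = img.length :=
  length_foldl_pvOverlayStep _ _

theorem length_foldl_pvOverlayLayer (ls : List (List Char)) (img : List Char) :
    (ls.foldl pvOverlayLayer img).length = img.length := by
  induction ls generalizing img with
  | nil => rfl
  | cons l ls ih => simp only [List.foldl_cons, ih, length_pvOverlayLayer]

-- pointwise effect of overlaying one layer starting at index s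
theorem pvOverlay_from (layer : List Char) (s : Nat) (img : List Char) (k : Nat)
    (hlen : s + layer.length ≤ img.length) :
    ((PySem.List.enumerate layer (s : Int)).foldl pvOverlayStep img).getD k '2' =
      if s ≤ k ∧ k < s + layer.length ∧ layer.getD (k - s) '2' ≠ '2'
      then layer.getD (k - s) '2' else img.getD k '2' := by
  induction layer generalizing s img with
  | nil =>
    simp only [PySem.List.enumerate_nil, List.foldl_nil, List.length_nil]
    rw [if_neg (by omega)]
  | cons c cs ih =>
    rw [PySem.List.enumerate_cons, List.foldl_cons]
    have hcast : (s : Int) + 1 = ((s + 1 : Nat) : Int) := by push_cast; ring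
    rw [hcast]
    have hlen' : (pvOverlayStep img ((s : Int), c)).length = img.length := by
      unfold pvOverlayStep; split <;> simp
    have hlenc : s + 1 + cs.length ≤ (pvOverlayStep img ((s : Int), c)).length := by
      rw [hlen']; simp only [List.length_cons] at hlen; omega
    rw [ih (s + 1) (pvOverlayStep img ((s : Int), c)) hlenc]
    unfold pvOverlayStep
    simp only [List.length_cons]
    by_cases hc : c ≠ '2'
    · rw [if_pos hc]
      simp only [Int.toNat_natCast]
      by_cases hks : k = s
      · subst hks
        rw [if_neg (by omega), if_pos (by simp [hc])]
        simp only [Nat.sub_self, List.getD_cons_zero]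
        have hk : k < img.length := by simp at hlen; omega
        rw [List.getD_eq_getElem?_getD, List.getElem?_set_self (by omega)]
        simp
      · by_cases hsk : s + 1 ≤ k ∧ k < s + 1 + cs.length ∧ cs.getD (k - (s + 1)) '2' ≠ '2'
        · rw [if_pos hsk]
          have h1 : (c :: cs).getD (k - s) '2' = cs.getD (k - (s + 1)) '2' := by
            have : k - s = (k - (s + 1)) + 1 := by omega
            rw [this, List.getD_cons_succ]
          rw [if_pos (by constructor; omega; constructor; omega; rw [h1]; exact hsk.2.2), h1]
        · rw [if_neg hsk]
          have himg : (img.set s c).getD k '2' = img.getD k '2' := by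
            rw [List.getD_eq_getElem?_getD, List.getD_eq_getElem?_getD,
              List.getElem?_set_ne (by omega)]
          rw [himg]
          by_cases hout : s ≤ k ∧ k < s + (cs.length + 1)
          · have h1 : (c :: cs).getD (k - s) '2' = cs.getD (k - (s + 1)) '2' := by
              have : k - s = (k - (s + 1)) + 1 := by omega
              rw [this, List.getD_cons_succ]
            by_cases h2 : (c :: cs).getD (k - s) '2' ≠ '2'
            · exfalso; exact hsk ⟨by omega, by omega, by rw [← h1]; exact h2⟩
            · rw [if_neg (by tauto)]
          · rw [if_neg (by tauto)]
    · rw [if_neg hc]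
      simp only [ne_eq, not_not] at hc
      subst hc
      by_cases hsk : s + 1 ≤ k ∧ k < s + 1 + cs.length ∧ cs.getD (k - (s + 1)) '2' ≠ '2'
      · have h1 : ('2' :: cs).getD (k - s) '2' = cs.getD (k - (s + 1)) '2' := by
          have : k - s = (k - (s + 1)) + 1 := by omega
          rw [this, List.getD_cons_succ]
        rw [if_pos hsk, if_pos ⟨by omega, by omega, by rw [h1]; exact hsk.2.2⟩, h1]
      · rw [if_neg hsk]
        by_cases hks : k = s
        · subst hks
          rw [if_neg (by simp)]
        · by_cases hout : s ≤ k ∧ k < s + (cs.length + 1)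
          · have h1 : ('2' :: cs).getD (k - s) '2' = cs.getD (k - (s + 1)) '2' := by
              have : k - s = (k - (s + 1)) + 1 := by omega
              rw [this, List.getD_cons_succ]
            by_cases h2 : ('2' :: cs).getD (k - s) '2' ≠ '2'
            · exfalso; exact hsk ⟨by omega, by omega, by rw [← h1]; exact h2⟩
            · rw [if_neg (by tauto)]
          · rw [if_neg (by tauto)]

-- the bottom-up overlay computes, at each in-range position, A's first-opaque pixel
theorem pvOverlay_eq_get_pixel (layers : List (List Char)) (img : List Char) (k : Nat)
    (hall : ∀ l ∈ layers, l.length = img.length) (hk : k < img.length) :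
    (layers.reverse.foldl pvOverlayLayer img).getD k '2' =
      (get_pixel layers (k : Int)).getD (img.getD k '2') := by
  induction layers with
  | nil => simp [get_pixel]
  | cons l rest ih =>
    have hl : l.length = img.length := hall l (by simp)
    have hrest : ∀ x ∈ rest, x.length = img.length := fun x hx => hall x (by simp [hx])
    rw [List.reverse_cons, List.foldl_append, List.foldl_cons, List.foldl_nil]
    rw [show pvOverlayLayer (rest.reverse.foldl pvOverlayLayer img) l =
      (PySem.List.enumerate l 0).foldl pvOverlayStep (rest.reverse.foldl pvOverlayLayer img)
      from rfl]
    have hfrom := pvOverlay_from l 0 (rest.reverse.foldl pvOverlayLayer img) k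
      (by rw [length_foldl_pvOverlayLayer]; omega)
    simp only [Nat.cast_zero, Nat.zero_add, Nat.zero_le, true_and, Nat.sub_zero] at hfrom
    rw [hfrom]
    have hget : PySem.List.pyGet? l (k : Int) = some (l[k]'(by omega)) :=
      PySem.List.pyGet?_ofNat l k (by omega)
    have hgd : l.getD k '2' = l[k]'(by omega) := List.getD_eq_getElem l '2' (by omega)
    have hpix : get_pixel (l :: rest) (k : Int) =
        if l[k]'(by omega) ≠ '2' then some (l[k]'(by omega)) else get_pixel rest (k : Int) := by
      simp only [get_pixel, hget]
    rw [hpix]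
    by_cases hc : l[k]'(by omega) ≠ '2'
    · rw [if_pos ⟨by omega, by rw [hgd]; exact hc⟩, if_pos hc, hgd, Option.getD_some]
    · rw [if_neg (by rw [hgd]; tauto), if_neg hc]
      exact ih hrest

-- inside Pre_, every layer produced by the slicing has exactly m*n characters
theorem pvLayer_length (input : String) (sz i : Int)
    (hsz : 0 < sz) (hi : 0 ≤ i)
    (hub : (i + 1) * sz ≤ (input.toList.length : Int)) :
    (PySem.List.slice input.toList (some (i * sz)) (some ((i + 1) * sz))).length = sz.toNat := by
  have ha : (0:Int) ≤ i * sz := mul_nonneg hi hsz.le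
  have hb : (0:Int) ≤ (i + 1) * sz := mul_nonneg (by omega) hsz.le
  rw [PySem.List.slice_toNat input.toList ha hb]
  simp only [List.length_take, List.length_drop]
  have h1 : ((i + 1) * sz).toNat = (i * sz).toNat + sz.toNat := by
    have : (i + 1) * sz = i * sz + sz := by ring
    rw [this]; omega
  have h2 : 0 ≤ i * sz := by positivity
  omega

-- the two images coincide
theorem pvImage_eq (input : String) (m n : Int) (h1 : 0 < m * n) :
    ((PySem.List.pyRange 0 (m*n) 1).map
      (fun i => (get_pixel ((PySem.List.pyRange 0 (PySem.Int.floordiv (PySem.Str.len input) (m*n)) 1).map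
        (fun i => PySem.List.slice input.toList (some (i*(m*n))) (some ((i+1)*(m*n))))) i).getD '2')) =
    (((PySem.List.pyRange 0 (PySem.Int.floordiv (PySem.Str.len input) (m*n)) 1).map
        (fun i => PySem.List.slice input.toList (some (i*(m*n))) (some ((i+1)*(m*n))))).reverse.foldl
      pvOverlayLayer (PySem.List.pyRepeat ['2'] (m*n))) := by
  set sz := m * n with hsz
  set L := PySem.Int.floordiv (PySem.Str.len input) sz with hL
  set layers := (PySem.List.pyRange 0 L 1).map
      (fun i => PySem.List.slice input.toList (some (i*sz)) (some ((i+1)*sz))) with hlayers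
  have hrep : PySem.List.pyRepeat ['2'] sz = List.replicate sz.toNat '2' :=
    PySem.List.pyRepeat_singleton ..
  have hall : ∀ l ∈ layers, l.length = sz.toNat := by
    intro l hl
    rw [hlayers] at hl
    obtain ⟨i, hi, rfl⟩ := List.mem_map.mp hl
    rw [PySem.List.mem_pyRange_one] at hi
    apply pvLayer_length input sz i h1 hi.1
    have hle : i + 1 ≤ L := by omega
    have := (PySem.Int.le_floordiv_iff_mul_le (a := PySem.Str.len input) (b := sz) (q := i + 1)
      h1).mp (by rw [← hL]; exact hle)
    simpa [PySem.Str.len_eq] using this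
  have hlenB : (layers.reverse.foldl pvOverlayLayer (PySem.List.pyRepeat ['2'] sz)).length
      = sz.toNat := by
    rw [hrep, length_foldl_pvOverlayLayer, List.length_replicate]
  apply List.ext_getElem?
  intro k
  by_cases hk : k < sz.toNat
  · have hA : ((PySem.List.pyRange 0 sz 1).map
        (fun i => (get_pixel layers i).getD '2'))[k]? =
        some ((get_pixel layers (k : Int)).getD '2') := by
      rw [show sz = ((sz.toNat : Nat) : Int) from by omega]
      rw [PySem.List.getElem?_map_pyRange_zero _ _ _ hk]
    have hB := pvOverlay_eq_get_pixel layers (List.replicate sz.toNat '2') k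
      (by intro l hl; rw [hall l hl, List.length_replicate]) (by simpa using hk)
    rw [hA, hrep, List.getElem?_eq_getElem (by rw [← hrep]; omega),
      ← List.getD_eq_getElem _ '2' (by rw [← hrep]; omega), hB]
    simp [List.getD_eq_getElem?_getD, hk]
  · have hlenA : ((PySem.List.pyRange 0 sz 1).map
        (fun i => (get_pixel layers i).getD '2')).length = sz.toNat := by
      simp [PySem.List.length_pyRange_one]
    rw [List.getElem?_eq_none (by omega), List.getElem?_eq_none (by omega)]

-- a slice layer's k-th character is the corresponding character of the input
theorem pvLayer_getD (input : String) (sz j : Int) (k : Nat)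
    (hsz : 0 < sz) (hj : 0 ≤ j) (hk : k < sz.toNat) :
    (PySem.List.slice input.toList (some (j * sz)) (some ((j + 1) * sz))).getD k '2' =
      input.toList.getD ((j * sz).toNat + k) '2' := by
  have ha : (0:Int) ≤ j * sz := mul_nonneg hj hsz.le
  have hb : (0:Int) ≤ (j + 1) * sz := mul_nonneg (by omega) hsz.le
  have h1 : ((j + 1) * sz).toNat = (j * sz).toNat + sz.toNat := by
    have h : (j + 1) * sz = j * sz + sz := by ring
    rw [h]; omega
  rw [PySem.List.slice_toNat input.toList ha hb,
    List.getD_eq_getElem?_getD, List.getD_eq_getElem?_getD,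
    List.getElem?_take, List.getElem?_drop, if_pos (by omega)]

-- if some layer is opaque at position k, A's first-opaque pixel there is opaque
theorem pvGetPixel_ne (layers : List (List Char)) (k : Nat)
    (hlen : ∀ l ∈ layers, k < l.length)
    (hex : ∃ l ∈ layers, l.getD k '2' ≠ '2') :
    (get_pixel layers (k : Int)).getD '2' ≠ '2' := by
  induction layers with
  | nil => simp at hex
  | cons l rest ih =>
    have hkl : k < l.length := hlen l (by simp)
    have hget : PySem.List.pyGet? l (k : Int) = some (l[k]'hkl) :=
      PySem.List.pyGet?_ofNat l k hkl
    have hgd : l.getD k '2' = l[k]'hkl := List.getD_eq_getElem l '2' hkl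
    have hpix : get_pixel (l :: rest) (k : Int) =
        if l[k]'hkl ≠ '2' then some (l[k]'hkl) else get_pixel rest (k : Int) := by
      simp only [get_pixel, hget]
    rw [hpix]
    by_cases hc : l[k]'hkl ≠ '2'
    · rw [if_pos hc, Option.getD_some]; exact hc
    · rw [if_neg hc]
      apply ih (fun x hx => hlen x (by simp [hx]))
      obtain ⟨w, hw, hwne⟩ := hex
      rcases List.mem_cons.mp hw with rfl | hwrest
      · exact absurd (by rw [hgd]; tauto) hwne
      · exact ⟨w, hwrest, hwne⟩

-- under Pre_, A's image contains no transparent pixel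
theorem pvContains_false (input : String) (m n : Int)
    (h1 : 0 < m * n)
    (h3 : ∀ i < (m*n).toNat, ∃ j < input.toList.length / (m*n).toNat,
      input.toList.getD (j * (m*n).toNat + i) '2' ≠ '2') :
    (((PySem.List.pyRange 0 (m*n) 1).map
      (fun i => (get_pixel ((PySem.List.pyRange 0 (PySem.Int.floordiv (PySem.Str.len input) (m*n)) 1).map
        (fun i => PySem.List.slice input.toList (some (i*(m*n))) (some ((i+1)*(m*n))))) i).getD '2'))).contains '2'
      = false := by
  set sz := m * n with hszdef
  have hszcast : sz = ((sz.toNat : Nat) : Int) := by omega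
  have hL : PySem.Int.floordiv (PySem.Str.len input) sz
      = ((input.toList.length / sz.toNat : Nat) : Int) := by
    rw [PySem.Str.len_eq]
    conv_lhs => rw [hszcast]
    rw [PySem.Int.floordiv_natCast]
  rw [Bool.eq_false_iff, Ne, List.contains_iff_mem]
  intro hmem
  obtain ⟨i, hi, heq⟩ := List.mem_map.mp hmem
  rw [PySem.List.mem_pyRange_one] at hi
  have hik : i = ((i.toNat : Nat) : Int) := by omega
  obtain ⟨j, hj, hjne⟩ := h3 i.toNat (by omega)
  have hjL : ((j : Nat) : Int) < PySem.Int.floordiv (PySem.Str.len input) sz := by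
    rw [hL]; exact_mod_cast hj
  have hle : (j + 1) * sz.toNat ≤ input.toList.length :=
    le_trans (Nat.mul_le_mul_right _ hj) (Nat.div_mul_le_self _ _)
  apply pvGetPixel_ne
    ((PySem.List.pyRange 0 (PySem.Int.floordiv (PySem.Str.len input) sz) 1).map
      (fun i => PySem.List.slice input.toList (some (i*sz)) (some ((i+1)*sz)))) i.toNat
  · intro l hl
    obtain ⟨x, hx, rfl⟩ := List.mem_map.mp hl
    rw [PySem.List.mem_pyRange_one] at hx
    rw [pvLayer_length input sz x h1 hx.1
      (by
        have := (PySem.Int.le_floordiv_iff_mul_le (a := PySem.Str.len input) (b := sz)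
          (q := x + 1) h1).mp (by omega)
        simpa [PySem.Str.len_eq] using this)]
    omega
  · refine ⟨PySem.List.slice input.toList (some (((j:Nat):Int)*sz)) (some ((((j:Nat):Int)+1)*sz)),
      List.mem_map.mpr ⟨((j:Nat):Int), PySem.List.mem_pyRange_one.mpr ⟨by positivity, hjL⟩, rfl⟩, ?_⟩
    rw [pvLayer_getD input sz ((j:Nat):Int) i.toNat h1 (by positivity) (by omega)]
    have harg : (((j:Nat):Int) * sz).toNat = j * sz.toNat := by
      conv_lhs => rw [hszcast]
      rw [← Nat.cast_mul, Int.toNat_natCast]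
    rw [harg]
    exact hjne
  · rw [← hik]; exact heq

-- ===== VERDICT (by name: the statement is the Claim_ definition above) =====
theorem compute_day08_spec : Claim_equal_compute_day08 := by
  intro input m n _hdom hpre
  obtain ⟨h1, _, h3⟩ := hpre
  unfold Spec_compute_day08 compute_day08 compute_day08_alt
  simp only []
  rw [← pvImage_eq input m n h1, pvContains_false input m n h1 h3]
  simp
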